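-- pv_equiv track=rewrite | github.com/RoboFinSystems/robosystems | robosystems/adapters/quickbooks/processors/uri_utils.py | qb_stripped_account_name
-- ===== SOURCE A (Python) =====
-- def qb_stripped_account_name(acct_name: str) -> str:
--   """Strip and normalize account name for URI generation."""
--   acct_name = acct_name.title()
--   acct_name = acct_name.replace(" ", "")
--   acct_name = acct_name.split("(")[0].strip()
--   symbol_list = [
--     "&",
--     "(",
--     ")",
--     ".",
--     ",",
--     ":",
--     ";",
--     "!",
--     "?",
--     "/",
--     "\\",
--     "|",
--     "+",
--     "=",
--     "*",
--     "@",
--     "#",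
--     "$",
--     "%",
--     "^",
--     "<",
--     ">",
--     "~",
--     "`",
--   ]
--   for symbol in symbol_list:
--     acct_name = acct_name.replace(symbol, "")
--   return acct_name
-- ===== SOURCE B (Python) =====
-- def qb_stripped_account_name(acct_name: str) -> str:
--   """Single left-to-right state machine over the raw string: title-case each char
--   inline, stop at '(', drop spaces everywhere, strip edge whitespace via a pending
--   buffer, and skip blacklisted symbols — one pass, no intermediate strings."""
--   symbols = "&().,:;!?/\\|+=*@#$%^<>~`"
--   out = []
--   pending = []
--   started = False
--   prev_alpha = False
--   for ch in acct_name: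
--     if ch == "(":
--       break
--     c = ch.lower() if prev_alpha else ch.upper()
--     prev_alpha = ch.isalpha()
--     if c == " ":
--       continue
--     if c.isspace():
--       if started:
--         pending.append(c)
--     else:
--       if started:
--         out.extend(pending)
--       pending = []
--       started = True
--       if c not in symbols:
--         out.append(c)
--   return "".join(out)
-- ===== Notes on version B (the rewrite author's own statement) =====
-- stated objective: alternative
-- what changed: A runs a staged pipeline of whole-string passes (title-casing, a space replace, a split at the first left parenthesis, a strip, then 24 sequential replace passes); B is a single left-to-right state machine over the raw string that title-cases each character inline, stops at the first left parenthesis, drops spaces and blacklisted symbols, and handles the edge-whitespace strip with a pending buffer -- one traversal, no intermediate strings.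
import Mathlib
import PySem

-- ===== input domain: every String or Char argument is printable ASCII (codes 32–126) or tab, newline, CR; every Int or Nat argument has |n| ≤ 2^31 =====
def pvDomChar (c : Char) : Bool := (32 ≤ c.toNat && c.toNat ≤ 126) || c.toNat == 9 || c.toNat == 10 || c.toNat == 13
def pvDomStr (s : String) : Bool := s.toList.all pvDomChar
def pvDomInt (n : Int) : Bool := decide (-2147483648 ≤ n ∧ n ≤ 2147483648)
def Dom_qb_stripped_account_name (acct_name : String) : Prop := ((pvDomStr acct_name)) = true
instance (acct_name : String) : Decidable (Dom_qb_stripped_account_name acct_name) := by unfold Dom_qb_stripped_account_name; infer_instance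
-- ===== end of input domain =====

-- B replaces A's staged pipeline of whole-string passes (title-casing, space replace, split, strip, 24 replace passes)
-- by one left-to-right state machine over the raw string (simpler decomposition; same result).

-- helper used by A's port: hand port of Python's str.title(), exact on ASCII:
-- a letter is uppercased when the previous character is not a letter, lowercased otherwise.
def pyTitleGo : Bool → List Char → List Char
  | _, [] => []
  | prevAlpha, c :: t =>
    if PySem.Chars.isalpha c then
      (if prevAlpha then PySem.Chars.lowerChar c else PySem.Chars.upperChar c) :: pyTitleGo true t
    else c :: pyTitleGo false t

def pyTitle (s : String) : String := String.ofList (pyTitleGo false s.toList)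

-- ===== PORT A =====
def qbSymbolList : List String :=
  ["&", "(", ")", ".", ",", ":", ";", "!", "?", "/", "\\", "|", "+", "=", "*", "@", "#", "$",
   "%", "^", "<", ">", "~", "`"]

def qb_stripped_account_name (acct_name : String) : String :=
  let a1 := pyTitle acct_name
  let a2 := PySem.Str.replace a1 " " ""
  -- .split("(")[0]: the separator is nonempty so split? is `some`, and the list is never
  -- empty, so Python's [0] is exactly headD
  let a3 := PySem.Str.strip (((PySem.Str.split? a2 "(").getD []).headD "")
  qbSymbolList.foldl (fun acc sym => PySem.Str.replace acc sym "") a3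

-- ===== PORT B =====
def qbSymbols : List Char :=
  ['&', '(', ')', '.', ',', ':', ';', '!', '?', '/', '\\', '|', '+', '=', '*', '@', '#', '$',
   '%', '^', '<', '>', '~', '`']

-- the state machine of Source B: (prev_alpha, started, pending, out) over the raw characters;
-- title-cases inline, stops at '(', skips spaces and symbols, buffers edge whitespace.
def qbGo : Bool → Bool → List Char → List Char → List Char → List Char
  | _, _, _, out, [] => out
  | prevAlpha, started, pending, out, ch :: t =>
    if ch = '(' then out
    else
      let c := if prevAlpha then PySem.Chars.lowerChar ch else PySem.Chars.upperChar ch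
      let pa := PySem.Chars.isalpha ch
      if c = ' ' then qbGo pa started pending out t
      else if PySem.Chars.isspace c then
        qbGo pa started (if started then pending ++ [c] else pending) out t
      else
        qbGo pa true [] ((if started then out ++ pending else out) ++
          (if qbSymbols.contains c then [] else [c])) t

def qb_stripped_account_name_alt (acct_name : String) : String :=
  String.ofList (qbGo false false [] [] acct_name.toList)

-- ===== PRECONDITION & SPEC =====
def Spec_qb_stripped_account_name (acct_name : String) (out : String) : Prop := out = qb_stripped_account_name_alt acct_name
instance (acct_name : String) (out : String) : Decidable (Spec_qb_stripped_account_name acct_name out) := by unfold Spec_qb_stripped_account_name; infer_instance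

-- ===== CLAIM (what is proved, stated in full; the proofs are below) =====
def Claim_equal_qb_stripped_account_name : Prop := ∀ (acct_name : String), Dom_qb_stripped_account_name acct_name → Spec_qb_stripped_account_name acct_name (qb_stripped_account_name acct_name)

-- ===== LEMMAS AND PROOFS =====

-- ---- character-level facts about title casing ----
lemma char_le_iff (a b : Char) : a ≤ b ↔ a.toNat ≤ b.toNat := Iff.rfl

lemma isalpha_lowerChar (ch : Char) (h : PySem.Chars.isalpha ch = true) :
    PySem.Chars.isalpha (PySem.Chars.lowerChar ch) = true := by
  unfold PySem.Chars.lowerChar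
  by_cases hu : PySem.Chars.isupper ch = true
  · simp only [hu, if_true]
    have hb : 65 ≤ ch.toNat ∧ ch.toNat ≤ 90 := by
      simpa only [PySem.Chars.isupper, Bool.and_eq_true, decide_eq_true_eq, char_le_iff,
        show ('A':Char).toNat = 65 from rfl, show ('Z':Char).toNat = 90 from rfl] using hu
    have hv : (ch.toNat + 32).isValidChar := by left; omega
    simp only [PySem.Chars.isalpha, PySem.Chars.islower, PySem.Chars.isupper, Bool.or_eq_true,
      Bool.and_eq_true, decide_eq_true_eq, char_le_iff, Char.toNat_ofNat, hv, if_true,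
      show ('A':Char).toNat = 65 from rfl, show ('Z':Char).toNat = 90 from rfl,
      show ('a':Char).toNat = 97 from rfl, show ('z':Char).toNat = 122 from rfl]
    omega
  · simpa only [hu, if_false] using h

lemma isalpha_upperChar (ch : Char) (h : PySem.Chars.isalpha ch = true) :
    PySem.Chars.isalpha (PySem.Chars.upperChar ch) = true := by
  unfold PySem.Chars.upperChar
  by_cases hl : PySem.Chars.islower ch = true
  · simp only [hl, if_true]
    have hb : 97 ≤ ch.toNat ∧ ch.toNat ≤ 122 := by
      simpa only [PySem.Chars.islower, Bool.and_eq_true, decide_eq_true_eq, char_le_iff,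
        show ('a':Char).toNat = 97 from rfl, show ('z':Char).toNat = 122 from rfl] using hl
    have hv : (ch.toNat - 32).isValidChar := by left; omega
    simp only [PySem.Chars.isalpha, PySem.Chars.islower, PySem.Chars.isupper, Bool.or_eq_true,
      Bool.and_eq_true, decide_eq_true_eq, char_le_iff, Char.toNat_ofNat, hv, if_true,
      show ('A':Char).toNat = 65 from rfl, show ('Z':Char).toNat = 90 from rfl,
      show ('a':Char).toNat = 97 from rfl, show ('z':Char).toNat = 122 from rfl]
    omega
  · simpa only [hl, if_false] using h

lemma cased_eq_of_not_alpha (ch : Char) (h : PySem.Chars.isalpha ch = false) (b : Bool) :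
    (if b then PySem.Chars.lowerChar ch else PySem.Chars.upperChar ch) = ch := by
  simp only [PySem.Chars.isalpha, Bool.or_eq_false_iff] at h
  cases b <;> simp [PySem.Chars.lowerChar, PySem.Chars.upperChar, h.1, h.2]

lemma cased_ne_paren (ch : Char) (b : Bool) (h : ch ≠ '(') :
    (if b then PySem.Chars.lowerChar ch else PySem.Chars.upperChar ch) ≠ '(' := by
  by_cases ha : PySem.Chars.isalpha ch = true
  · intro e
    have halpha : PySem.Chars.isalpha
        (if b then PySem.Chars.lowerChar ch else PySem.Chars.upperChar ch) = true := by
      cases b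
      · simpa using isalpha_upperChar ch ha
      · simpa using isalpha_lowerChar ch ha
    rw [e] at halpha
    exact absurd halpha (by decide)
  · rw [cased_eq_of_not_alpha ch (by simpa using ha) b]; exact h

-- pyTitleGo emits exactly the cased character in every branch
lemma pyTitleGo_cons (prev : Bool) (ch : Char) (t : List Char) :
    pyTitleGo prev (ch :: t)
      = (if prev then PySem.Chars.lowerChar ch else PySem.Chars.upperChar ch)
          :: pyTitleGo (PySem.Chars.isalpha ch) t := by
  by_cases ha : PySem.Chars.isalpha ch = true
  · simp [pyTitleGo, ha]
  · have ha' : PySem.Chars.isalpha ch = false := by simpa using ha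
    simp [pyTitleGo, ha', cased_eq_of_not_alpha ch ha']

-- ---- A-side reduction: the staged pipeline at the character level ----

-- replacing a single character by "" is filtering it out
lemma replace_go_single (c : Char) :
    ∀ (fuel : Nat) (l acc : List Char), l.length ≤ fuel →
      PySem.Chars.replace.go [c] [] fuel l acc
        = acc.reverse ++ l.filter (fun d => d != c) := by
  intro fuel
  induction fuel with
  | zero =>
    intro l acc h
    have : l = [] := List.eq_nil_of_length_eq_zero (Nat.le_zero.mp h)
    subst this
    simp [PySem.Chars.replace.go]
  | succ n ih =>
    intro l acc h
    cases l with
    | nil => simp [PySem.Chars.replace.go]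
    | cons x t =>
      have ht : t.length ≤ n := by simpa using Nat.le_of_succ_le_succ h
      simp only [PySem.Chars.replace.go]
      by_cases hx : x = c
      · subst hx
        rw [if_pos (by simp [List.isPrefixOf])]
        simp only [List.length_singleton, List.drop_succ_cons, List.drop_zero,
          List.reverse_nil, List.nil_append]
        rw [ih t acc ht]
        simp
      · rw [if_neg (by simp [List.isPrefixOf]; exact fun hc => absurd hc.symm hx)]
        rw [ih t (x :: acc) ht]
        simp [hx]

lemma replace_single_eq_filter (c : Char) (cs : List Char) :
    PySem.Chars.replace cs [c] [] = cs.filter (fun d => d != c) := by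
  have h := replace_go_single c cs.length cs [] (le_refl _)
  simpa [PySem.Chars.replace] using h

-- first piece of a single-character split is takeWhile
lemma splitOn_go_head (sep : Char) :
    ∀ (fuel : Nat) (l cur : List Char) (accs : List (List Char)), l.length ≤ fuel →
      ∃ rest, PySem.Chars.splitOn.go [sep] fuel l cur accs
        = accs.reverse ++ (cur.reverse ++ l.takeWhile (fun d => d != sep)) :: rest := by
  intro fuel
  induction fuel with
  | zero =>
    intro l cur accs h
    have : l = [] := List.eq_nil_of_length_eq_zero (Nat.le_zero.mp h)
    subst this
    exact ⟨[], by simp [PySem.Chars.splitOn.go]⟩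
  | succ n ih =>
    intro l cur accs h
    cases l with
    | nil => exact ⟨[], by simp [PySem.Chars.splitOn.go]⟩
    | cons c t =>
      have ht : t.length ≤ n := by simpa using Nat.le_of_succ_le_succ h
      by_cases hc : c = sep
      · subst hc
        obtain ⟨r, hr⟩ := ih t [] (cur.reverse :: accs) ht
        refine ⟨t.takeWhile (fun d => d != c) :: r, ?_⟩
        simp only [PySem.Chars.splitOn.go]
        rw [if_pos (by simp [List.isPrefixOf])]
        simp only [List.length_singleton, List.drop_succ_cons, List.drop_zero]
        rw [hr]
        simp [bne]
      · obtain ⟨r, hr⟩ := ih t (c :: cur) accs ht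
        refine ⟨r, ?_⟩
        simp only [PySem.Chars.splitOn.go]
        rw [if_neg (by simp [List.isPrefixOf]; exact fun h' => absurd h'.symm hc)]
        rw [hr]
        simp [hc]

lemma splitOn_headD (sep : Char) (l : List Char) :
    (PySem.Chars.splitOn l [sep]).headD [] = l.takeWhile (fun d => d != sep) := by
  obtain ⟨rest, h⟩ := splitOn_go_head sep (l.length + 1) l [] [] (Nat.le_succ _)
  simp [PySem.Chars.splitOn, h]

lemma takeWhile_filter_comm (p q : Char → Bool) (h : ∀ c, p c = false → q c = true)
    (l : List Char) : (l.filter p).takeWhile q = (l.takeWhile q).filter p := by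
  induction l with
  | nil => simp
  | cons c t ih =>
    by_cases hp : p c = true
    · by_cases hq : q c = true
      · simp [hp, hq, ih]
      · have hq' : q c = false := by simpa using hq
        simp [hp, hq']
    · have hp' : p c = false := by simpa using hp
      have hq := h c hp'
      simp [hp', hq, ih]

lemma foldl_replace_singletons (syms : List Char) (cs : List Char) :
    (syms.map (fun c => [c])).foldl (fun l sym => PySem.Chars.replace l sym []) cs
      = cs.filter (fun d => !syms.contains d) := by
  induction syms generalizing cs with
  | nil => simp
  | cons c t ih =>
    simp only [List.map_cons, List.foldl_cons]
    rw [replace_single_eq_filter, ih, List.filter_filter]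
    apply List.filter_congr
    intro d _
    simp only [List.contains_cons, Bool.not_or, Bool.and_comm]
    by_cases hdc : d = c <;> simp [hdc, bne]

-- the 24-replace loop of A, at the character level, is one filter
lemma foldl_replace_toList (syms : List String) (s : String) :
    (syms.foldl (fun acc sym => PySem.Str.replace acc sym "") s).toList
      = syms.foldl (fun cs sym => PySem.Chars.replace cs sym.toList []) s.toList := by
  induction syms generalizing s with
  | nil => rfl
  | cons x t ih => simp [List.foldl_cons, ih, PySem.Str.toList_replace]

-- headD-of-split? bridge to the character level
lemma split_headD_toList (s : String) :
    (((PySem.Str.split? s "(").getD []).headD "").toList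
      = s.toList.takeWhile (fun d => d != '(') := by
  have hb := PySem.Str.split?_map s "("
  rw [show ("(" : String).toList = ['('] from rfl] at hb
  rw [show PySem.Chars.split? s.toList ['('] = some (PySem.Chars.splitOn s.toList ['(']) from rfl] at hb
  cases hsplit : PySem.Str.split? s "(" with
  | none => rw [hsplit] at hb; simp at hb
  | some parts =>
    rw [hsplit] at hb
    simp only [Option.map_some, Option.some_inj] at hb
    have hh : (parts.headD "").toList = (parts.map String.toList).headD [] := by
      cases parts <;> simp
    rw [Option.getD_some, hh, hb, splitOn_headD]

-- the core character stream both programs agree on: title-cased, cut at '(', spaces removed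
def qbStream (prev : Bool) (l : List Char) : List Char :=
  ((pyTitleGo prev l).takeWhile (fun d => d != '(')).filter (fun d => d != ' ')

-- the 24 one-character strings of A's symbol list, as character singletons
lemma foldl_syms_toList (cs : List Char) :
    qbSymbolList.foldl (fun l sym => PySem.Chars.replace l sym.toList []) cs
      = (qbSymbols.map (fun c => [c])).foldl (fun l t => PySem.Chars.replace l t []) cs := by
  simp only [qbSymbolList, qbSymbols, List.foldl_cons, List.map_cons, List.map_nil,
    List.foldl_nil]
  rfl

-- A's result is: filter the symbols out of the stripped core stream
lemma a_toList (s : String) :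
    (qb_stripped_account_name s).toList
      = (PySem.Chars.strip (qbStream false s.toList)).filter
          (fun d => !qbSymbols.contains d) := by
  unfold qb_stripped_account_name
  simp only []
  rw [foldl_replace_toList, foldl_syms_toList, foldl_replace_singletons,
    PySem.Str.toList_strip]
  have harg : (((PySem.Str.split? (PySem.Str.replace (pyTitle s) " " "") "(").getD []).headD "").toList
      = qbStream false s.toList := by
    rw [split_headD_toList, PySem.Str.toList_replace,
      show (" " : String).toList = [' '] from rfl, show ("" : String).toList = [] from rfl,
      replace_single_eq_filter,
      show (pyTitle s).toList = pyTitleGo false s.toList from by simp [pyTitle]]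
    unfold qbStream
    exact takeWhile_filter_comm _ _ (fun c hc => by
      have hce : c = ' ' := by simpa [bne] using hc
      simp [hce, bne]) _
  rw [harg]

-- ---- B-side reduction ----

-- the machine restricted to the core stream (space-free, pre-'(' characters)
def qbCore : Bool → List Char → List Char → List Char → List Char
  | _, _, out, [] => out
  | started, pending, out, c :: t =>
    if PySem.Chars.isspace c then
      qbCore started (if started then pending ++ [c] else pending) out t
    else
      qbCore true [] ((if started then out ++ pending else out) ++
        (if qbSymbols.contains c then [] else [c])) t

-- step 1: the raw machine is the core machine run on the core stream
lemma qbGo_eq_core (l : List Char) :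
    ∀ (prev started : Bool) (pending out : List Char),
      qbGo prev started pending out l = qbCore started pending out (qbStream prev l) := by
  induction l with
  | nil => intro prev st p out; simp [qbGo, qbStream, pyTitleGo, qbCore]
  | cons ch t ih =>
    intro prev st p out
    by_cases hp : ch = '('
    · subst hp
      have h1 : qbGo prev st p out ('(' :: t) = out := by simp [qbGo]
      have h2 : qbStream prev ('(' :: t) = [] := by
        rw [qbStream, pyTitleGo_cons, List.takeWhile_cons,
          show ((if prev = true then PySem.Chars.lowerChar '(' else PySem.Chars.upperChar '(') != '(') = false
            from by cases prev <;> decide]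
        simp
      rw [h1, h2, qbCore]
    · have hcne := cased_ne_paren ch prev hp
      rw [qbStream, pyTitleGo_cons, List.takeWhile_cons,
        if_pos (by simpa [bne_iff_ne] using hcne), List.filter_cons]
      by_cases hsp : (if prev = true then PySem.Chars.lowerChar ch else PySem.Chars.upperChar ch) = ' '
      · rw [if_neg (show ¬(((if prev = true then PySem.Chars.lowerChar ch
            else PySem.Chars.upperChar ch) != ' ') = true) from by simp [hsp])]
        simp only [qbGo, if_neg hp]
        rw [if_pos hsp, ih _ st p out, qbStream]
      · rw [if_pos (by simpa [bne_iff_ne] using hsp)]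
        simp only [qbGo, if_neg hp]
        rw [if_neg hsp]
        by_cases hws : PySem.Chars.isspace
            (if prev = true then PySem.Chars.lowerChar ch else PySem.Chars.upperChar ch) = true
        · rw [if_pos hws, ih _ st _ out]
          simp only [qbCore, hws, if_true, qbStream]
        · rw [if_neg hws, ih _ true [] _]
          simp only [qbCore, qbStream]
          rw [if_neg hws]

-- rstrip facts
lemma rstrip_eq_nil_of_all_ws (p : List Char)
    (hp : ∀ c ∈ p, PySem.Chars.isspace c = true) : PySem.Chars.rstrip p = [] := by
  unfold PySem.Chars.rstrip
  rw [List.dropWhile_eq_nil_iff.mpr (fun c hc => hp c (List.mem_reverse.mp hc))]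
  rfl

lemma rstrip_append_cons (xs : List Char) (c : Char) (t : List Char)
    (hc : PySem.Chars.isspace c = false) :
    PySem.Chars.rstrip (xs ++ c :: t) = xs ++ c :: PySem.Chars.rstrip t := by
  unfold PySem.Chars.rstrip
  rw [List.reverse_append, List.reverse_cons, List.append_assoc, List.dropWhile_append]
  by_cases he : (t.reverse.dropWhile PySem.Chars.isspace).isEmpty
  · rw [if_pos he]
    rw [List.singleton_append, List.dropWhile_cons_of_neg (by simp [hc])]
    rw [List.isEmpty_iff] at he
    simp [he]
  · rw [if_neg he]
    simp

-- step 2a: the started machine appends the symbol-filtered right-stripped remainder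
lemma qbCore_started (l : List Char) :
    ∀ (p out : List Char), (∀ c ∈ p, PySem.Chars.isspace c = true) →
      qbCore true p out l
        = out ++ (PySem.Chars.rstrip (p ++ l)).filter (fun d => !qbSymbols.contains d) := by
  induction l with
  | nil =>
    intro p out hp
    simp [qbCore, rstrip_eq_nil_of_all_ws p hp]
  | cons c t ih =>
    intro p out hp
    by_cases hws : PySem.Chars.isspace c = true
    · simp only [qbCore, hws, if_true]
      rw [ih (p ++ [c]) out (by
        intro d hd
        rcases List.mem_append.mp hd with h | h
        · exact hp d h
        · simp at h; subst h; exact hws)]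
      simp
    · have hws' : PySem.Chars.isspace c = false := by simpa using hws
      simp only [qbCore, hws', if_false, Bool.false_eq_true]
      rw [ih [] _ (by simp)]
      rw [rstrip_append_cons p c t hws']
      have hpf : p.filter (fun d => !qbSymbols.contains d) = p := by
        rw [List.filter_eq_self]
        intro d hd
        have hds := hp d hd
        simp only [Bool.not_eq_eq_eq_not, Bool.not_true]
        by_contra hmem
        simp only [Bool.not_eq_false, List.contains_eq_mem, decide_eq_true_eq] at hmem
        have : PySem.Chars.isspace d = false := by
          fin_cases hmem <;> rfl
        rw [this] at hds; exact absurd hds (by simp)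
      simp only [List.nil_append, List.filter_append, List.filter_cons, hpf]
      by_cases hsym : c ∈ qbSymbols
      · simp [hsym]
      · simp [hsym, List.append_assoc]

-- step 2b: from the initial state the machine computes filter-of-strip
lemma qbCore_spec (l : List Char) :
    ∀ out, qbCore false [] out l
      = out ++ (PySem.Chars.strip l).filter (fun d => !qbSymbols.contains d) := by
  induction l with
  | nil => intro out; simp [qbCore, PySem.Chars.strip, PySem.Chars.lstrip, PySem.Chars.rstrip]
  | cons c t ih =>
    intro out
    by_cases hws : PySem.Chars.isspace c = true
    · simp only [qbCore, hws, if_true, if_false, Bool.false_eq_true]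
      rw [ih out]
      unfold PySem.Chars.strip PySem.Chars.lstrip
      rw [List.dropWhile_cons_of_pos hws]
    · have hws' : PySem.Chars.isspace c = false := by simpa using hws
      simp only [qbCore, hws', if_false, Bool.false_eq_true]
      rw [qbCore_started t [] _ (by simp)]
      unfold PySem.Chars.strip PySem.Chars.lstrip
      rw [List.dropWhile_cons_of_neg (by simp [hws'])]
      have : PySem.Chars.rstrip (c :: t) = c :: PySem.Chars.rstrip t :=
        rstrip_append_cons [] c t hws'
      rw [this]
      simp only [List.nil_append, List.filter_cons]
      by_cases hsym : c ∈ qbSymbols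
      · simp [hsym]
      · simp [hsym, List.append_assoc]

lemma b_toList (s : String) :
    (qb_stripped_account_name_alt s).toList
      = (PySem.Chars.strip (qbStream false s.toList)).filter
          (fun d => !qbSymbols.contains d) := by
  unfold qb_stripped_account_name_alt
  rw [show ∀ l : List Char, (String.ofList l).toList = l from fun l => by simp]
  rw [qbGo_eq_core, qbCore_spec]
  simp

-- ===== VERDICT (by name: the statement is the Claim_ definition above) =====
theorem qb_stripped_account_name_spec : Claim_equal_qb_stripped_account_name := by
  intro s _
  unfold Spec_qb_stripped_account_name
  apply String.toList_inj.mp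
  rw [a_toList, b_toList]
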